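-- pv_equiv track=rewrite | github.com/inyukwo1/qgm_decoder | qgm_transformer/utils.py | filter_action
-- ===== SOURCE A (Python) =====
-- def filter_action(qgm_action, target_symbol, prev_symbols):
--     prev_symbols = list(reversed(prev_symbols))
--     # Get actions
--     actions = []
--     for idx, action in enumerate(qgm_action):
--         # Is target symbol
--         if action[0] == target_symbol:
--             # is possible to satisfy condition
--             if prev_symbols and idx >= len(prev_symbols):
--                 # Check if satisfy prev symbol condition
--                 if False not in [
--                     qgm_action[idx - (s_idx + 1)][0] == prev_symbol
--                     for s_idx, prev_symbol in enumerate(prev_symbols)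
--                 ]:
--                     actions += [action]
--     return actions
-- ===== SOURCE B (Python) =====
-- def filter_action(qgm_action, target_symbol, prev_symbols):
--     # One forward pass keeping a sliding window of the last len(prev_symbols)
--     # leading symbols; no random access back into qgm_action.
--     k = len(prev_symbols)
--     result = []
--     window = []
--     for action in qgm_action:
--         if k and action[0] == target_symbol and window == prev_symbols:
--             result.append(action)
--         window.append(action[0])
--         if len(window) > k:
--             del window[0]
--     return result
-- ===== Notes on version B (the rewrite author's own statement) =====
-- stated objective: alternative
-- what changed: B replaces A's per-candidate backward index scan over qgm_action (reversed prev_symbols, list-comprehension membership test) with a single forward pass maintaining a sliding window of the last k leading symbols, compared to prev_symbols directly.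
import Mathlib
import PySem

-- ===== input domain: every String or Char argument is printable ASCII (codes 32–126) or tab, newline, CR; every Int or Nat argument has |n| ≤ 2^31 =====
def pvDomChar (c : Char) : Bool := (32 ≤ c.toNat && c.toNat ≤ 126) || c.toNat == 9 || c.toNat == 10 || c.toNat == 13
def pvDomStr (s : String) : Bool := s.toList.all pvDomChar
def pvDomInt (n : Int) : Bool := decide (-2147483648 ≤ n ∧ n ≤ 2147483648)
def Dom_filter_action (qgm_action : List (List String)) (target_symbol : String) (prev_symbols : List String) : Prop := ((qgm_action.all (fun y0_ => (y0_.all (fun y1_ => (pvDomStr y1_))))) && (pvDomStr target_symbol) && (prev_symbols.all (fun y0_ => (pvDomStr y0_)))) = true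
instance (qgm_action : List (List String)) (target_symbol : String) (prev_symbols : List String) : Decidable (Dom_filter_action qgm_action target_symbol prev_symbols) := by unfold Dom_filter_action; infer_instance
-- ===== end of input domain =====

-- B does the same job in one forward pass with a sliding window of the last k leading symbols
-- instead of A's backward index scan per candidate (objective: alternative, same asymptotic cost).

-- ===== PORT A =====
-- literal transliteration of A: reversed prev_symbols, enumerate loop, nested ifs,
-- 'False not in [...]' as !(… .contains false); action[0] and qgm_action[…][0] are
-- PySem.List.pyGetD with a default that Pre_ guarantees is never consulted
-- (Python raises IndexError exactly on the inputs Pre_ excludes)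
def filter_action (qgm_action : List (List String)) (target_symbol : String) (prev_symbols : List String) : List (List String) :=
  let prev := prev_symbols.reverse
  (PySem.List.enumerate qgm_action 0).foldl
    (fun actions ia =>
      if PySem.List.pyGetD ia.2 0 "" == target_symbol then
        if (!prev.isEmpty) && decide (ia.1 ≥ (prev.length : Int)) then
          if !(((PySem.List.enumerate prev 0).map
                (fun sp => PySem.List.pyGetD (PySem.List.pyGetD qgm_action (ia.1 - (sp.1 + 1)) []) 0 "" == sp.2)).contains false) then
            actions ++ [ia.2]
          else actions
        else actions
      else actions) []

-- ===== PORT B =====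
-- literal transliteration of Source B: foldl over qgm_action carrying (result, window);
-- window.pop(0) is .tail (the popped list is nonempty, an element was just appended)
def filter_action_alt (qgm_action : List (List String)) (target_symbol : String) (prev_symbols : List String) : List (List String) :=
  let k := prev_symbols.length
  (qgm_action.foldl
    (fun (st : List (List String) × List String) action =>
      let res := if decide (k ≠ 0) && (PySem.List.pyGetD action 0 "" == target_symbol) && (st.2 == prev_symbols)
                 then st.1 ++ [action] else st.1
      let w := st.2 ++ [PySem.List.pyGetD action 0 ""]
      (res, if w.length > k then w.tail else w))
    ([], [])).1

-- ===== PRECONDITION & SPEC =====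
-- Pre_ excludes qgm_action containing an empty inner list: there Python's action[0]
-- (or qgm_action[...][0]) raises IndexError, so A returns normally on exactly the inputs below.
def Pre_filter_action (qgm_action : List (List String)) (target_symbol : String) (prev_symbols : List String) : Prop :=
  ∀ a ∈ qgm_action, a ≠ []
instance (qgm_action : List (List String)) (target_symbol : String) (prev_symbols : List String) : Decidable (Pre_filter_action qgm_action target_symbol prev_symbols) := by unfold Pre_filter_action; infer_instance

def pvWitness_filter_action : List (List String) × String × List String :=
  ([["A"], ["B"], ["C", "x"], ["B"], ["C"]], "C", ["A", "B"])

def Spec_filter_action (qgm_action : List (List String)) (target_symbol : String) (prev_symbols : List String) (out : List (List String)) : Prop := out = filter_action_alt qgm_action target_symbol prev_symbols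
instance (qgm_action : List (List String)) (target_symbol : String) (prev_symbols : List String) (out : List (List String)) : Decidable (Spec_filter_action qgm_action target_symbol prev_symbols out) := by unfold Spec_filter_action; infer_instance

-- ===== CLAIM (what is proved, stated in full; the proofs are below) =====
def Claim_equal_filter_action : Prop := ∀ (qgm_action : List (List String)) (target_symbol : String) (prev_symbols : List String), Dom_filter_action qgm_action target_symbol prev_symbols → Pre_filter_action qgm_action target_symbol prev_symbols → Spec_filter_action qgm_action target_symbol prev_symbols (filter_action qgm_action target_symbol prev_symbols)

-- ===== LEMMAS AND PROOFS =====

-- the leading symbol of an action, as both ports compute it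
def pvHd (a : List String) : String := PySem.List.pyGetD a 0 ""

-- the sliding window B carries after having consumed the prefix `pre`
def pvWnd (k : Nat) (pre : List (List String)) : List String :=
  (pre.map pvHd).drop (pre.length - k)

-- A's loop body, named (definitionally the lambda in the port of A, with prev already reversed)
def pvStepA (qgm : List (List String)) (target_symbol : String) (prevRev : List String)
    (actions : List (List String)) (ia : Int × List String) : List (List String) :=
  if PySem.List.pyGetD ia.2 0 "" == target_symbol then
    if (!prevRev.isEmpty) && decide (ia.1 ≥ (prevRev.length : Int)) then
      if !(((PySem.List.enumerate prevRev 0).map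
            (fun sp => PySem.List.pyGetD (PySem.List.pyGetD qgm (ia.1 - (sp.1 + 1)) []) 0 "" == sp.2)).contains false) then
        actions ++ [ia.2]
      else actions
    else actions
  else actions

-- B's loop body, named (definitionally the lambda in the port of B)
def pvStepB (target_symbol : String) (prev_symbols : List String)
    (st : List (List String) × List String) (action : List String) :
    List (List String) × List String :=
  (if decide (prev_symbols.length ≠ 0) && (PySem.List.pyGetD action 0 "" == target_symbol) && (st.2 == prev_symbols)
   then st.1 ++ [action] else st.1,
   if (st.2 ++ [PySem.List.pyGetD action 0 ""]).length > prev_symbols.length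
   then (st.2 ++ [PySem.List.pyGetD action 0 ""]).tail
   else st.2 ++ [PySem.List.pyGetD action 0 ""])

theorem pvWnd_length (k : Nat) (pre : List (List String)) :
    (pvWnd k pre).length = min pre.length k := by
  simp [pvWnd]; omega

-- B's window update realises pvWnd on the extended prefix
theorem pvWnd_step (k : Nat) (pre : List (List String)) (a : List String) :
    (if ((pvWnd k pre) ++ [pvHd a]).length > k then ((pvWnd k pre) ++ [pvHd a]).tail
     else (pvWnd k pre) ++ [pvHd a]) = pvWnd k (pre ++ [a]) := by
  have hlen := pvWnd_length k pre
  by_cases hk : k ≤ pre.length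
  · rw [if_pos (by simp only [List.length_append, List.length_cons, List.length_nil]; omega)]
    rcases Nat.eq_zero_or_pos k with h0 | hpos
    · subst h0
      simp only [pvWnd, Nat.sub_zero, List.map_append, List.map_cons, List.map_nil,
        List.length_append, List.length_cons, List.length_nil]
      rw [List.drop_eq_nil_of_le (by simp), List.drop_eq_nil_of_le (by simp)]
      simp
    · have hne : pvWnd k pre ≠ [] := by
        intro he; rw [he] at hlen; simp at hlen; omega
      rw [List.tail_append_singleton_of_ne_nil hne]
      unfold pvWnd
      rw [List.tail_drop]
      simp only [List.map_append, List.map_cons, List.map_nil, List.length_append,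
        List.length_cons, List.length_nil]
      rw [List.drop_append_of_le_length (by simp only [List.length_map]; omega)]
      congr 2
      omega
  · rw [if_neg (by simp only [List.length_append, List.length_cons, List.length_nil]; omega)]
    unfold pvWnd
    simp only [List.map_append, List.map_cons, List.map_nil, List.length_append,
      List.length_cons, List.length_nil]
    rw [Nat.sub_eq_zero_of_le (by omega), Nat.sub_eq_zero_of_le (by omega),
      List.drop_zero, List.drop_zero]

-- (pre.map pvHd).getD n "" computes the head default of pre.getD n []
theorem pvMapGetD (pre : List (List String)) (n : Nat) (hn : n < pre.length) :
    (pre.map pvHd).getD n "" = PySem.List.pyGetD (pre.getD n []) 0 "" := by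
  rw [List.getD_eq_getElem _ _ (by simpa using hn), List.getElem_map, List.getD_eq_getElem _ _ hn]
  rfl

-- pvWnd = prev, elementwise
theorem pvWnd_eq_iff (pre : List (List String)) (prev_symbols : List String)
    (hik : prev_symbols.length ≤ pre.length) :
    pvWnd prev_symbols.length pre = prev_symbols ↔
      ∀ m : Nat, m < prev_symbols.length →
        (pre.map pvHd).getD (pre.length - prev_symbols.length + m) "" = prev_symbols.getD m "" := by
  constructor
  · intro he m hm
    have h1 : (pvWnd prev_symbols.length pre).getD m "" = prev_symbols.getD m "" := by rw [he]
    rw [List.getD_eq_getElem _ _ (by rw [pvWnd_length]; omega)] at h1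
    unfold pvWnd at h1
    rw [List.getElem_drop] at h1
    rw [List.getD_eq_getElem _ _ (by simp only [List.length_map]; omega)]
    exact h1
  · intro hm
    apply List.ext_getElem
    · rw [pvWnd_length]; omega
    · intro m h1 h2
      have hv := hm m (by omega)
      rw [List.getD_eq_getElem _ _ (by simp only [List.length_map]; omega),
        List.getD_eq_getElem _ _ h2] at hv
      unfold pvWnd
      rw [List.getElem_drop]
      exact hv

-- the two guard conditions agree at position pre.length of the full list
theorem pvCond_eq (qgm pre rest : List (List String)) (a : List String)
    (prev_symbols : List String) (h : pre ++ a :: rest = qgm) :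
    ((!prev_symbols.reverse.isEmpty) &&
       decide (((pre.length : Int)) ≥ (prev_symbols.reverse.length : Int)) &&
       !(((PySem.List.enumerate prev_symbols.reverse 0).map
            (fun sp => PySem.List.pyGetD (PySem.List.pyGetD qgm ((pre.length : Int) - (sp.1 + 1)) []) 0 "" == sp.2)).contains false))
    = (decide (prev_symbols.length ≠ 0) && (pvWnd prev_symbols.length pre == prev_symbols)) := by
  by_cases hk0 : prev_symbols = []
  · subst hk0; simp
  · have hk : 0 < prev_symbols.length := List.length_pos_of_ne_nil hk0
    have hc1 : (!prev_symbols.reverse.isEmpty) = true := by simp [hk0]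
    have hkd : decide (prev_symbols.length ≠ 0) = true := by simp; omega
    by_cases hik : prev_symbols.length ≤ pre.length
    · have hc2 : decide ((pre.length : Int) ≥ (prev_symbols.reverse.length : Int)) = true := by
        simp only [List.length_reverse, ge_iff_le, decide_eq_true_eq]
        exact_mod_cast hik
      rw [hc1, hc2, hkd]
      simp only [Bool.true_and]
      rw [Bool.eq_iff_iff]
      simp only [Bool.not_eq_true', beq_iff_eq]
      rw [pvWnd_eq_iff pre prev_symbols hik]
      rw [PySem.List.enumerate_eq_map_pyRange prev_symbols.reverse "", List.map_map]
      rw [show (∀ (l : List Bool), (l.contains false = false) ↔ ∀ x ∈ l, x = true) from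
        fun l => by simp]
      simp only [List.forall_mem_map, Function.comp_apply, beq_iff_eq,
        PySem.List.mem_pyRange_one, and_imp, PySem.List.len, List.length_reverse]
      constructor
      · intro hA m hm
        have hj := hA ((prev_symbols.length - 1 - m : Nat) : Int)
          (Int.natCast_nonneg _)
          (by exact_mod_cast (by omega : prev_symbols.length - 1 - m < prev_symbols.length))
        rw [PySem.List.pyGetD_natCast] at hj
        rw [show ((pre.length : Int) - (((prev_symbols.length - 1 - m : Nat) : Int) + 1))
            = ((pre.length - prev_symbols.length + m : Nat) : Int) from by omega] at hj
        rw [PySem.List.pyGetD_natCast] at hj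
        rw [List.getD_eq_getElem prev_symbols.reverse ""
            (by simp only [List.length_reverse]; omega), List.getElem_reverse] at hj
        rw [← List.getD_eq_getElem prev_symbols ""
            (show prev_symbols.length - 1 - (prev_symbols.length - 1 - m) < prev_symbols.length
              from by omega)] at hj
        rw [show prev_symbols.length - 1 - (prev_symbols.length - 1 - m) = m from by omega] at hj
        rw [← h, List.getD_eq_getElem?_getD, List.getElem?_append_left (by omega),
          ← List.getD_eq_getElem?_getD] at hj
        rw [pvMapGetD pre _ (by omega)]
        exact hj
      · intro hB j hj0 hjk
        lift j to ℕ using hj0 with jn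
        have hjn : jn < prev_symbols.length := by exact_mod_cast hjk
        have hb := hB (prev_symbols.length - 1 - jn) (by omega)
        rw [pvMapGetD pre _ (by omega)] at hb
        rw [PySem.List.pyGetD_natCast]
        rw [show ((pre.length : Int) - ((jn : Int) + 1))
            = ((pre.length - prev_symbols.length + (prev_symbols.length - 1 - jn) : Nat) : Int) from by omega]
        rw [PySem.List.pyGetD_natCast]
        rw [← h, List.getD_eq_getElem?_getD, List.getElem?_append_left (by omega),
          ← List.getD_eq_getElem?_getD]
        rw [List.getD_eq_getElem prev_symbols.reverse ""
            (by simp only [List.length_reverse]; omega), List.getElem_reverse]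
        rw [← List.getD_eq_getElem prev_symbols "" (by omega)]
        exact hb
    · have hc2 : decide ((pre.length : Int) ≥ (prev_symbols.reverse.length : Int)) = false := by
        simp only [decide_eq_false_iff_not]
        intro hcon
        rw [List.length_reverse] at hcon
        omega
      have hwne : (pvWnd prev_symbols.length pre == prev_symbols) = false := by
        apply beq_eq_false_iff_ne.mpr
        intro he
        have hl := congrArg List.length he
        rw [pvWnd_length] at hl
        omega
      rw [hc1, hc2, hwne]
      simp

-- the generalized loop correspondence
theorem pvMain (qgm : List (List String)) (target_symbol : String) (prev_symbols : List String) :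
    ∀ (rest pre res : List (List String)), pre ++ rest = qgm →
      (PySem.List.enumerate rest (pre.length : Int)).foldl
          (pvStepA qgm target_symbol prev_symbols.reverse) res
      = (rest.foldl (pvStepB target_symbol prev_symbols)
          (res, pvWnd prev_symbols.length pre)).1 := by
  intro rest
  induction rest with
  | nil =>
    intro pre res _
    simp [PySem.List.enumerate_nil]
  | cons a rest ih =>
    intro pre res hsplit
    rw [PySem.List.enumerate_cons]
    simp only [List.foldl_cons]
    have hpair : pvStepB target_symbol prev_symbols (res, pvWnd prev_symbols.length pre) a
        = (pvStepA qgm target_symbol prev_symbols.reverse res ((pre.length : Int), a),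
           pvWnd prev_symbols.length (pre ++ [a])) := by
      refine Prod.ext_iff.mpr ⟨?_, ?_⟩
      · simp only [pvStepA, pvStepB]
        have hcond := pvCond_eq qgm pre rest a prev_symbols hsplit
        cases hht : (PySem.List.pyGetD a 0 "" == target_symbol) with
        | false => simp
        | true =>
          simp only [Bool.and_true, if_true]
          rw [show ∀ (b1 b2 : Bool) (X Y : List (List String)),
              (if b1 then (if b2 then X else Y) else Y) = (if b1 && b2 then X else Y) from
            by intro b1 b2 X Y; cases b1 <;> simp]
          rw [hcond]
      · simp only [pvStepB]
        exact pvWnd_step prev_symbols.length pre a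
    rw [hpair]
    rw [show ((pre.length : Int) + 1) = (((pre ++ [a]).length : Nat) : Int) from by
      simp only [List.length_append, List.length_cons, List.length_nil]; push_cast; ring]
    exact ih (pre ++ [a]) _ (by simpa using hsplit)

-- ===== VERDICT (by name: the statement is the Claim_ definition above) =====
theorem filter_action_spec : Claim_equal_filter_action := by
  intro qgm target prev _ _
  show filter_action qgm target prev = filter_action_alt qgm target prev
  have h := pvMain qgm target prev qgm [] [] rfl
  rw [show ((([] : List (List String)).length : Nat) : Int) = 0 from by simp] at h
  rw [show pvWnd prev.length ([] : List (List String)) = [] from by simp [pvWnd]] at h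
  exact h
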